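-- pv_equiv track=rewrite | github.com/DaniilPanasenko/AdvancedSnakeGame | alphabet.py | translate_with_zoom
-- ===== SOURCE A (Python) =====
-- alphabet = {'A': '01110'
--                  '10001'
--                  '11111'
--                  '10001'
--                  '10001',
--             'B': '1111010001111101000111110',
--             'C': '0111010001100001000101110',
--             'D': '1111010001100011000111110',
--             'E': '1111110000111101000011111',
--             'F': '1111110000111101000010000',
--             'G': '0111110000101111000101111',
--             'H': '1000110001111111000110001',
--             'I': '111010010010111',
--             'J': '0001100001000011000101110',
--             'K': '1000110010111001001010001',
--             'L': '10001000100010001111',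
--             'M': '1000111011101011000110001',
--             'N': '1000111001101011001110001',
--             'O': '0111010001100011000101110',
--             'P': '1111010001111101000010000',
--             'Q': '0110010010100101001001101',
--             'R': '1111010001111101001010001',
--             'S': '0111110000011100000111110',
--             'T': '1111100100001000010000100',
--             'U': '1000110001100011000101110',
--             'V': '1000110001100010101000100',
--             'W': '1010110101101011010101010',
--             'X': '1000101010001000101010001',
--             'Y': '1000101010001000010000100',
--             'Z': '1111100010001000100011111',
--             '1': '110010010010111',
--             '2': '1111000001011111000011111',
--             '3': '1111000001011100000111110',
--             '4': '1000110001111110000100001',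
--             '5': '1111110000111100000111110',
--             '6': '0111010000111101000101110',
--             '7': '1111100001000010001000010',
--             '8': '0111010001011101000101110',
--             '9': '0111010001011110000101110',
--             '0': '0111010001100011000101110',
--             '!': '11101',
--             '.': '00001',
--             '?': '11100001011000000100',
--             ':': '01010',
--             ' ': '000000000000000'
--             }
--
-- def translate(string):
--     arr = [[], [], [], [], []]
--     for char in string:
--         letter = alphabet[char]
--         length = int(len(letter) / 5)
--         for i in range(5):
--             for j in range(length):
--                 arr[i].append(int(letter[i * length + j]))
--             arr[i].append(0)
--     return arr
--
-- def translate_with_color(string, color):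
--     arr = translate(string)
--     for i in range(len(arr)):
--         for j in range(len(arr[i])):
--             if arr[i][j] == 1:
--                 arr[i][j] = color
--     return arr
--
-- def translate_with_zoom(string, color):
--     arr = translate_with_color(string, color)
--     new_arr = []
--     for i in range(len(arr)):
--         new_arr.append([])
--         new_arr.append([])
--         for j in range(len(arr[i])):
--             new_arr[i * 2].append(arr[i][j])
--             new_arr[i * 2].append(arr[i][j])
--             new_arr[i * 2 + 1].append(arr[i][j])
--             new_arr[i * 2 + 1].append(arr[i][j])
--     return new_arr
-- ===== SOURCE B (Python) =====
-- alphabet = {'A': '01110'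
--                  '10001'
--                  '11111'
--                  '10001'
--                  '10001',
--             'B': '1111010001111101000111110',
--             'C': '0111010001100001000101110',
--             'D': '1111010001100011000111110',
--             'E': '1111110000111101000011111',
--             'F': '1111110000111101000010000',
--             'G': '0111110000101111000101111',
--             'H': '1000110001111111000110001',
--             'I': '111010010010111',
--             'J': '0001100001000011000101110',
--             'K': '1000110010111001001010001',
--             'L': '10001000100010001111',
--             'M': '1000111011101011000110001',
--             'N': '1000111001101011001110001',
--             'O': '0111010001100011000101110',
--             'P': '1111010001111101000010000',
--             'Q': '0110010010100101001001101',
--             'R': '1111010001111101001010001',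
--             'S': '0111110000011100000111110',
--             'T': '1111100100001000010000100',
--             'U': '1000110001100011000101110',
--             'V': '1000110001100010101000100',
--             'W': '1010110101101011010101010',
--             'X': '1000101010001000101010001',
--             'Y': '1000101010001000010000100',
--             'Z': '1111100010001000100011111',
--             '1': '110010010010111',
--             '2': '1111000001011111000011111',
--             '3': '1111000001011100000111110',
--             '4': '1000110001111110000100001',
--             '5': '1111110000111100000111110',
--             '6': '0111010000111101000101110',
--             '7': '1111100001000010001000010',
--             '8': '0111010001011101000101110',
--             '9': '0111010001011110000101110',
--             '0': '0111010001100011000101110',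
--             '!': '11101',
--             '.': '00001',
--             '?': '11100001011000000100',
--             ':': '01010',
--             ' ': '000000000000000'
--             }
--
--
-- def translate_with_zoom(string, color):
--     # single pass: build the 10 zoomed+colored rows directly, no intermediate arrays
--     rows = [[] for _ in range(10)]
--     for char in string:
--         bitmap = alphabet[char]
--         n = len(bitmap) // 5
--         for i in range(5):
--             cells = []
--             for j in range(n):
--                 c = color if bitmap[i * n + j] == '1' else 0
--                 cells.append(c)
--                 cells.append(c)
--             cells.append(0)
--             cells.append(0)
--             rows[2 * i] = rows[2 * i] + cells
--             rows[2 * i + 1] = rows[2 * i + 1] + cells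
--     return rows
-- ===== Notes on version B (the rewrite author's own statement) =====
-- stated objective: simpler
-- what changed: B builds the 10 zoomed, colored output rows directly in a single pass over the string (per glyph row it emits each pixel's colored value twice plus a doubled separator), eliminating A's intermediate translate and translate_with_color arrays and their two extra full passes.
import Mathlib
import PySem

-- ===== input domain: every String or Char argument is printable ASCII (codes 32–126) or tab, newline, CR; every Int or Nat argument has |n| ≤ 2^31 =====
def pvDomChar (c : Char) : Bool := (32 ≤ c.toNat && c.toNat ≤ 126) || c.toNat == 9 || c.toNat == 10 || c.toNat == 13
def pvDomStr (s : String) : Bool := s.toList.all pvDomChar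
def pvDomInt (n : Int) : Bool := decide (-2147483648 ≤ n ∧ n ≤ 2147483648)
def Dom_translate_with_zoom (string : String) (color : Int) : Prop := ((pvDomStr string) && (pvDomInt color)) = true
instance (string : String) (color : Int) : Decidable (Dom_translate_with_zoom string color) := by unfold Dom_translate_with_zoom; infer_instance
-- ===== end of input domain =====

-- B builds the 10 zoomed+colored output rows in one pass over the string, dropping A's
-- intermediate translate / translate_with_color arrays (objective: simpler decomposition).

-- ===== PORT A =====
-- the module-level 'alphabet' dict (distinct literal keys, so Dict.mk of the pair list is exact)
def pvAlphabet : PySem.Dict Char String := PySem.Dict.mk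
  [('A', "0111010001111111000110001"),
    ('B', "1111010001111101000111110"),
    ('C', "0111010001100001000101110"),
    ('D', "1111010001100011000111110"),
    ('E', "1111110000111101000011111"),
    ('F', "1111110000111101000010000"),
    ('G', "0111110000101111000101111"),
    ('H', "1000110001111111000110001"),
    ('I', "111010010010111"),
    ('J', "0001100001000011000101110"),
    ('K', "1000110010111001001010001"),
    ('L', "10001000100010001111"),
    ('M', "1000111011101011000110001"),
    ('N', "1000111001101011001110001"),
    ('O', "0111010001100011000101110"),
    ('P', "1111010001111101000010000"),
    ('Q', "0110010010100101001001101"),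
    ('R', "1111010001111101001010001"),
    ('S', "0111110000011100000111110"),
    ('T', "1111100100001000010000100"),
    ('U', "1000110001100011000101110"),
    ('V', "1000110001100010101000100"),
    ('W', "1010110101101011010101010"),
    ('X', "1000101010001000101010001"),
    ('Y', "1000101010001000010000100"),
    ('Z', "1111100010001000100011111"),
    ('1', "110010010010111"),
    ('2', "1111000001011111000011111"),
    ('3', "1111000001011100000111110"),
    ('4', "1000110001111110000100001"),
    ('5', "1111110000111100000111110"),
    ('6', "0111010000111101000101110"),
    ('7', "1111100001000010001000010"),
    ('8', "0111010001011101000101110"),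
    ('9', "0111010001011110000101110"),
    ('0', "0111010001100011000101110"),
    ('!', "11101"),
    ('.', "00001"),
    ('?', "11100001011000000100"),
    (':', "01010"),
    (' ', "000000000000000")]

-- int(letter[i*length+j]); the index is in range by construction, so getD's defaults are never used.
-- alphabet[char] raises KeyError on a missing key: Pre_ excludes those strings (getD "" outside Pre_).
def pvBitA (letter : List Char) (k : Nat) : Int :=
  (PySem.Int.ofChars? [letter.getD k '0']).getD 0

-- inner loops of translate: for j in range(length): arr[i].append(int(letter[i*length+j])); arr[i].append(0)
def pvRowStepA (letter : List Char) (n i : Nat) (row : List Int) : List Int :=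
  ((List.range n).foldl (fun r j => r ++ [pvBitA letter (i * n + j)]) row) ++ [0]

def pvTranslate (string : String) : List (List Int) :=
  string.toList.foldl (fun arr char =>
    let letter := ((pvAlphabet.get? char).getD "").toList
    let n := letter.length / 5        -- int(len(letter)/5): exact since len(letter) < 2^53
    (List.range 5).foldl (fun arr i => arr.set i (pvRowStepA letter n i (arr.getD i []))) arr)
    [[], [], [], [], []]

-- translate_with_color: the index loops set arr[i][j] := color exactly where it equals 1
def pvColor (color : Int) (arr : List (List Int)) : List (List Int) :=
  arr.map (fun row => row.map (fun x => if x = 1 then color else x))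

-- translate_with_zoom's loops: row 2*i and row 2*i+1 each receive every element of arr[i] twice
def pvZoomRow (row : List Int) : List Int := row.foldl (fun r x => r ++ [x, x]) []
def pvZoom (arr : List (List Int)) : List (List Int) :=
  arr.foldl (fun new row => new ++ [pvZoomRow row, pvZoomRow row]) []

def translate_with_zoom (string : String) (color : Int) : List (List Int) :=
  pvZoom (pvColor color (pvTranslate string))

-- ===== PORT B =====
-- cells of one source row i of a glyph: each pixel doubled and colored, then the doubled separator
def pvCellsB (color : Int) (bitmap : List Char) (n i : Nat) : List Int :=
  ((List.range n).foldl (fun cs j =>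
      let c := if bitmap.getD (i * n + j) '0' = '1' then color else 0
      cs ++ [c, c]) []) ++ [0, 0]

def translate_with_zoom_alt (string : String) (color : Int) : List (List Int) :=
  string.toList.foldl (fun rows char =>
    let bitmap := ((pvAlphabet.get? char).getD "").toList
    let n := bitmap.length / 5
    (List.range 5).foldl (fun rows i =>
      let cells := pvCellsB color bitmap n i
      let rows1 := rows.set (2 * i) ((rows.getD (2 * i) []) ++ cells)
      rows1.set (2 * i + 1) ((rows1.getD (2 * i + 1) []) ++ cells)) rows)
    (List.replicate 10 [])

-- ===== PRECONDITION & SPEC =====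
-- Python A raises KeyError when some character of the string is not a key of 'alphabet';
-- Pre_ excludes exactly those strings.
def Pre_translate_with_zoom (string : String) (color : Int) : Prop :=
  string.toList.all (fun c => pvAlphabet.contains c) = true
instance (string : String) (color : Int) : Decidable (Pre_translate_with_zoom string color) := by
  unfold Pre_translate_with_zoom; infer_instance

def pvWitness_translate_with_zoom : String × Int := ("HI 2", 7)

def Spec_translate_with_zoom (string : String) (color : Int) (out : List (List Int)) : Prop := out = translate_with_zoom_alt string color
instance (string : String) (color : Int) (out : List (List Int)) : Decidable (Spec_translate_with_zoom string color out) := by unfold Spec_translate_with_zoom; infer_instance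

-- ===== CLAIM (what is proved, stated in full; the proofs are below) =====
def Claim_equal_translate_with_zoom : Prop := ∀ (string : String) (color : Int), Dom_translate_with_zoom string color → Pre_translate_with_zoom string color → Spec_translate_with_zoom string color (translate_with_zoom string color)

-- ===== LEMMAS AND PROOFS =====

-- the colored-and-doubled transform of one source row, and of the whole 5-row array
def pvF (color x : Int) : Int := if x = 1 then color else x
def pvG (color : Int) (row : List Int) : List Int := row.flatMap (fun x => [pvF color x, pvF color x])
def pvZC (color : Int) (arr : List (List Int)) : List (List Int) :=
  arr.flatMap (fun row => [pvG color row, pvG color row])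

-- bitmaps consist of '0'/'1' only (Bool form: the Prop-BAll instance does not reduce by decide)
def pvBitmapOK (s : List Char) : Prop := (s.all fun ch => ch == '0' || ch == '1') = true

lemma pv_lookup_ok (l : List (Char × String))
    (h : (l.all fun p => p.2.toList.all fun ch => ch == '0' || ch == '1') = true) (c : Char) :
    pvBitmapOK (((PySem.Dict.mk l).get? c).getD "").toList := by
  induction l with
  | nil =>
    rw [show (PySem.Dict.mk ([] : List (Char × String))).get? c = none from rfl]
    rfl
  | cons p rest ih =>
    rw [List.all_cons, Bool.and_eq_true] at h
    rw [PySem.Dict.get?_mk_cons]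
    split
    · exact h.1
    · exact ih h.2

set_option maxHeartbeats 1000000 in
lemma pv_allOK (c : Char) : pvBitmapOK (((pvAlphabet.get? c).getD "").toList) :=
  pv_lookup_ok _ (by decide) c

lemma pv_cell_eq (color : Int) (letter : List Char) (h : pvBitmapOK letter) (k : Nat) :
    pvF color (pvBitA letter k) = (if letter.getD k '0' = '1' then color else 0) := by
  rcases Nat.lt_or_ge k letter.length with hk | hk
  · simp only [pvBitA, List.getD_eq_getElem _ _ hk]
    have h0 := List.all_eq_true.mp h _ (letter.getElem_mem hk)
    rcases (Bool.or_eq_true _ _).mp h0 with h1 | h1 <;> rw [beq_iff_eq] at h1 <;> rw [h1]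
    · rw [show (PySem.Int.ofChars? ['0']).getD 0 = (0:Int) from by decide, if_neg (by decide)]
      simp [pvF]
    · rw [show (PySem.Int.ofChars? ['1']).getD 0 = (1:Int) from by decide, if_pos rfl]
      simp [pvF]
  · simp only [pvBitA, List.getD_eq_default _ _ hk]
    rw [show (PySem.Int.ofChars? ['0']).getD 0 = (0:Int) from by decide, if_neg (by decide)]
    simp [pvF]

lemma pv_zc_eq (color : Int) (arr : List (List Int)) :
    pvZoom (pvColor color arr) = pvZC color arr := by
  simp [pvZoom, pvColor, pvZC, pvG, pvZoomRow, pvF, List.flatMap_def]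
  simp [Function.comp_def, List.map_map]

lemma pv_row_step (color : Int) (letter : List Char) (h : pvBitmapOK letter) (n i : Nat)
    (row : List Int) :
    pvG color (pvRowStepA letter n i row) = pvG color row ++ pvCellsB color letter n i := by
  simp only [pvRowStepA, pvCellsB, PySem.List.foldl_append_singleton_eq_map,
    PySem.List.foldl_append_eq_flatMap, pvG, List.flatMap_append, List.flatMap_map,
    List.nil_append, List.append_assoc, pv_cell_eq color letter h]
  simp [pvF]

-- one character's step, on a 5-row accumulator
lemma pv_char_step (color : Int) (char : Char) (arr : List (List Int)) (harr : arr.length = 5) :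
    pvZC color
      ((List.range 5).foldl (fun arr i =>
        arr.set i (pvRowStepA ((pvAlphabet.get? char).getD "").toList
          (((pvAlphabet.get? char).getD "").toList.length / 5) i (arr.getD i []))) arr)
    = (List.range 5).foldl (fun rows i =>
        let cells := pvCellsB color ((pvAlphabet.get? char).getD "").toList
          (((pvAlphabet.get? char).getD "").toList.length / 5) i
        let rows1 := rows.set (2 * i) ((rows.getD (2 * i) []) ++ cells)
        rows1.set (2 * i + 1) ((rows1.getD (2 * i + 1) []) ++ cells)) (pvZC color arr) := by
  match arr, harr with
  | [a, b, c, d, e], _ =>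
    have hok := pv_allOK char
    simp only [show List.range 5 = [0, 1, 2, 3, 4] from rfl, List.foldl_cons, List.foldl_nil]
    simp [pvZC, List.getD, pv_row_step color _ hok]

lemma pv_stepA_length (char : Char) (arr : List (List Int)) :
    ((List.range 5).foldl (fun arr i =>
        arr.set i (pvRowStepA ((pvAlphabet.get? char).getD "").toList
          (((pvAlphabet.get? char).getD "").toList.length / 5) i (arr.getD i []))) arr).length
      = arr.length := by
  simp [show List.range 5 = [0, 1, 2, 3, 4] from rfl]

lemma pv_fold_eq (color : Int) (cs : List Char) :
    ∀ arr : List (List Int), arr.length = 5 →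
    cs.foldl (fun rows char =>
      let bitmap := ((pvAlphabet.get? char).getD "").toList
      let n := bitmap.length / 5
      (List.range 5).foldl (fun rows i =>
        let cells := pvCellsB color bitmap n i
        let rows1 := rows.set (2 * i) ((rows.getD (2 * i) []) ++ cells)
        rows1.set (2 * i + 1) ((rows1.getD (2 * i + 1) []) ++ cells)) rows) (pvZC color arr)
    = pvZC color (cs.foldl (fun arr char =>
        let letter := ((pvAlphabet.get? char).getD "").toList
        let n := letter.length / 5
        (List.range 5).foldl (fun arr i => arr.set i (pvRowStepA letter n i (arr.getD i []))) arr)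
        arr) := by
  induction cs with
  | nil => intro arr _; rfl
  | cons c rest ih =>
    intro arr harr
    simp only [List.foldl_cons]
    rw [← pv_char_step color c arr harr, ih _ (by rw [pv_stepA_length]; exact harr)]

-- ===== VERDICT (by name: the statement is the Claim_ definition above) =====
theorem translate_with_zoom_spec : Claim_equal_translate_with_zoom := by
  intro string color _ _
  show translate_with_zoom string color = translate_with_zoom_alt string color
  unfold translate_with_zoom translate_with_zoom_alt pvTranslate
  rw [pv_zc_eq]
  exact (pv_fold_eq color string.toList [[], [], [], [], []] rfl).symm
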